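-- pv_equiv track=rewrite | github.com/ckingmuzic/blackboxaf | src/blackboxaf/extraction/anonymizer.py | _is_ecosystem_term
-- ===== SOURCE A (Python) =====
-- _SF_ECOSYSTEM_PRODUCTS = {
--     # Marketing automation
--     "marketo", "mkto", "pardot", "eloqua", "hubspot", "mailchimp",
--     "exacttarget", "salesforcemktg",
--     # ABM / Intent
--     "demandbase", "6sense", "bombora", "terminus", "rollworks", "triblio",
--     # Data enrichment / Intelligence
--     "zoominfo", "clearbit", "dun", "dnb", "hoovers", "leadiq",
--     "lusha", "apollo", "cognism", "seamless", "slintel",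
--     # Sales engagement
--     "outreach", "salesloft", "gong", "chorus", "clari", "groove",
--     "xactly", "velocify", "ringdna", "orum",
--     # CPQ / Billing
--     "conga", "apttus", "docusign", "pandadoc", "zuora",
--     "chargebee", "recurly", "avalara",
--     # Integration / iPaaS
--     "mulesoft", "jitterbit", "informatica", "talend", "workato",
--     "tray", "celigo", "boomi", "snaplogic",
--     # Social / Communication
--     "linkedin", "slack", "twilio", "sendgrid", "ringcentral",
--     "vonage", "bandwidth", "plivo", "talkdesk",
--     # Support / Service
--     "zendesk", "freshdesk", "intercom", "drift", "qualified",
--     "livechat", "chatbot", "ada",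
--     # Analytics / BI
--     "tableau", "domo", "looker", "powerbi", "qlik", "sisense",
--     # Project / Collaboration
--     "jira", "asana", "monday", "smartsheet", "wrike", "basecamp",
--     "confluence", "notion",
--     # ERP / Finance
--     "netsuite", "quickbooks", "xero", "sage", "intacct", "workday",
--     "coupa", "ariba", "certify", "expensify",
--     # Data quality / Enrichment (AppExchange)
--     "ringlead", "cloudingo", "cloudinga", "usergem", "clay",
--     "datagrail", "validity", "people", "dupe",
--     # Sales enablement / Productivity (AppExchange)
--     "showpad", "highspot", "seismic", "calendly", "chili",
--     "conga", "formstack", "netdocuments",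
--     # Document / E-signature
--     "docusign", "pandadoc", "adobe", "echosign", "hellosign",
--     # Managed package prefixes (namespace__Field__c)
--     "npsp", "npe", "hed", "sfims", "dlrs",
--     "bizible", "bizible2", "bizibleid",
--     "mkto", "mkto_si", "mkto71",
--     "x6sense",
--     "lsf", "sked", "cventsfdc", "rh2",
--     "lnt", "dozisf", "zvc",
-- }
--
-- def _is_ecosystem_term(term: str) -> bool:
--     """Check if a term matches or contains a known SF ecosystem product.
--
--     Matches: 'BizibleId' (contains 'bizible'), 'SyncToMarketo' (contains 'marketo'),
--     'mkto_si' (exact match), 'X6sense' (contains '6sense').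
--     """
--     lower = term.lower()
--     # Exact match
--     if lower in _SF_ECOSYSTEM_PRODUCTS:
--         return True
--     # Check if term contains an ecosystem product name (4+ char to avoid short false matches)
--     for eco in _SF_ECOSYSTEM_PRODUCTS:
--         if len(eco) >= 4 and eco in lower:
--             return True
--     return False
-- ===== SOURCE B (Python) =====
-- """Alternative _is_ecosystem_term: the product list is stored as blob lines split at
-- load; short (<4 char) products go to a set for exact matching, long products are
-- grouped by first character and matched by a single left-to-right sweep of prefix
-- tests instead of one full substring scan per product."""
--
-- _ECO_LINES = (
--     "marketo mkto pardot eloqua hubspot mailchimp exacttarget salesforcemktg demandbase 6sense",  # Marketing automation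
--     "bombora terminus rollworks triblio zoominfo clearbit dun dnb hoovers leadiq",  # ABM / intent / enrichment
--     "lusha apollo cognism seamless slintel outreach salesloft gong chorus clari",  # Sales intelligence / engagement
--     "groove xactly velocify ringdna orum conga apttus docusign pandadoc zuora",  # Sales engagement / CPQ
--     "chargebee recurly avalara mulesoft jitterbit informatica talend workato tray celigo",  # Billing / iPaaS
--     "boomi snaplogic linkedin slack twilio sendgrid ringcentral vonage bandwidth plivo",  # Integration / communication
--     "talkdesk zendesk freshdesk intercom drift qualified livechat chatbot ada tableau",  # Communication / support
--     "domo looker powerbi qlik sisense jira asana monday smartsheet wrike",  # Analytics / BI / project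
--     "basecamp confluence notion netsuite quickbooks xero sage intacct workday coupa",  # Collaboration / ERP
--     "ariba certify expensify ringlead cloudingo cloudinga usergem clay datagrail validity",  # Finance / data quality
--     "people dupe showpad highspot seismic calendly chili formstack netdocuments adobe",  # Enablement / productivity
--     "echosign hellosign npsp npe hed sfims dlrs bizible bizible2 bizibleid",  # E-signature / managed packages
--     "mkto_si mkto71 x6sense lsf sked cventsfdc rh2 lnt dozisf zvc",  # Managed package prefixes
-- )
--
-- _PRODUCTS = [p for line in _ECO_LINES for p in line.split()]
--
-- _SHORT = set()
-- _BY_FIRST = {}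
-- for _p in _PRODUCTS:
--     if len(_p) < 4:
--         _SHORT.add(_p)
--     else:
--         _BY_FIRST.setdefault(_p[0], []).append(_p)
--
--
-- def _is_ecosystem_term(term: str) -> bool:
--     lower = term.lower()
--     if lower in _SHORT:
--         return True
--     for i, ch in enumerate(lower):
--         for p in _BY_FIRST.get(ch, ()):
--             if lower.startswith(p, i):
--                 return True
--     return False
-- ===== Notes on version B (the rewrite author's own statement) =====
-- stated objective: alternative
-- what changed: B stores the products as blob lines split once at load, keeps the <4-char products in a set for the exact-match test, and groups the >=4-char products by first character, replacing A's one-full-substring-scan-per-product loop with a single left-to-right sweep over the term that prefix-tests only the products starting with the current character.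
import Mathlib
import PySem

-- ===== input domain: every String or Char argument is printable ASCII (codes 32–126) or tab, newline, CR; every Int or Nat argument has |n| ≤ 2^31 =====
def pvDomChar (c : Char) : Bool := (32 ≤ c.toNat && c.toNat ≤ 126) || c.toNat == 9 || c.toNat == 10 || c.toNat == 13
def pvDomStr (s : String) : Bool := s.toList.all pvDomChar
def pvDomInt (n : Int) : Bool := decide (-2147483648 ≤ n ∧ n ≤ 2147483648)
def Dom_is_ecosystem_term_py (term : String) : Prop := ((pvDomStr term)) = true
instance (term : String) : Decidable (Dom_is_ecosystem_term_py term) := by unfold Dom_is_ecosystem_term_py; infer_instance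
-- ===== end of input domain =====

-- B stores the products as blob lines split at load, keeps the short (<4 char) ones in a set for
-- the exact-match test, and groups the long ones by first character for one left-to-right sweep
-- of prefix tests (alternative traversal; not claimed faster).

-- ===== PORT A =====
-- the module-level set literal _SF_ECOSYSTEM_PRODUCTS (distinct elements, literal order)
def ecoProducts : List String := ["marketo",
    "mkto",
    "pardot",
    "eloqua",
    "hubspot",
    "mailchimp",
    "exacttarget",
    "salesforcemktg",
    "demandbase",
    "6sense",
    "bombora",
    "terminus",
    "rollworks",
    "triblio",
    "zoominfo",
    "clearbit",
    "dun",
    "dnb",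
    "hoovers",
    "leadiq",
    "lusha",
    "apollo",
    "cognism",
    "seamless",
    "slintel",
    "outreach",
    "salesloft",
    "gong",
    "chorus",
    "clari",
    "groove",
    "xactly",
    "velocify",
    "ringdna",
    "orum",
    "conga",
    "apttus",
    "docusign",
    "pandadoc",
    "zuora",
    "chargebee",
    "recurly",
    "avalara",
    "mulesoft",
    "jitterbit",
    "informatica",
    "talend",
    "workato",
    "tray",
    "celigo",
    "boomi",
    "snaplogic",
    "linkedin",
    "slack",
    "twilio",
    "sendgrid",
    "ringcentral",
    "vonage",
    "bandwidth",
    "plivo",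
    "talkdesk",
    "zendesk",
    "freshdesk",
    "intercom",
    "drift",
    "qualified",
    "livechat",
    "chatbot",
    "ada",
    "tableau",
    "domo",
    "looker",
    "powerbi",
    "qlik",
    "sisense",
    "jira",
    "asana",
    "monday",
    "smartsheet",
    "wrike",
    "basecamp",
    "confluence",
    "notion",
    "netsuite",
    "quickbooks",
    "xero",
    "sage",
    "intacct",
    "workday",
    "coupa",
    "ariba",
    "certify",
    "expensify",
    "ringlead",
    "cloudingo",
    "cloudinga",
    "usergem",
    "clay",
    "datagrail",
    "validity",
    "people",
    "dupe",
    "showpad",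
    "highspot",
    "seismic",
    "calendly",
    "chili",
    "formstack",
    "netdocuments",
    "adobe",
    "echosign",
    "hellosign",
    "npsp",
    "npe",
    "hed",
    "sfims",
    "dlrs",
    "bizible",
    "bizible2",
    "bizibleid",
    "mkto_si",
    "mkto71",
    "x6sense",
    "lsf",
    "sked",
    "cventsfdc",
    "rh2",
    "lnt",
    "dozisf",
    "zvc"]

def is_ecosystem_term_py (term : String) : Bool :=
  let lower := PySem.Str.lower term
  if PySem.Set.contains ecoProducts lower then true
  else ecoProducts.any (fun eco => decide (4 ≤ PySem.Str.len eco) && PySem.Str.isIn eco lower)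

-- ===== PORT B =====
-- _ECO_LINES: the products as blob lines, split at load (B's representation)
def ecoLines : List String := ["marketo mkto pardot eloqua hubspot mailchimp exacttarget salesforcemktg demandbase 6sense",
    "bombora terminus rollworks triblio zoominfo clearbit dun dnb hoovers leadiq",
    "lusha apollo cognism seamless slintel outreach salesloft gong chorus clari",
    "groove xactly velocify ringdna orum conga apttus docusign pandadoc zuora",
    "chargebee recurly avalara mulesoft jitterbit informatica talend workato tray celigo",
    "boomi snaplogic linkedin slack twilio sendgrid ringcentral vonage bandwidth plivo",
    "talkdesk zendesk freshdesk intercom drift qualified livechat chatbot ada tableau",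
    "domo looker powerbi qlik sisense jira asana monday smartsheet wrike",
    "basecamp confluence notion netsuite quickbooks xero sage intacct workday coupa",
    "ariba certify expensify ringlead cloudingo cloudinga usergem clay datagrail validity",
    "people dupe showpad highspot seismic calendly chili formstack netdocuments adobe",
    "echosign hellosign npsp npe hed sfims dlrs bizible bizible2 bizibleid",
    "mkto_si mkto71 x6sense lsf sked cventsfdc rh2 lnt dozisf zvc"]

-- _PRODUCTS = [p for line in _ECO_LINES for p in line.split()]
def ecoListB : List String := ecoLines.flatMap (fun line => PySem.Str.split₀ line)

-- _SHORT: products of length < 4 (the set.add branch of the load loop)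
def shortProducts : PySem.Set String :=
  PySem.Set.ofList (ecoListB.filter (fun p => decide (PySem.Str.len p < 4)))

-- _BY_FIRST: products of length >= 4 grouped by their first character (setdefault/append branch)
def longByFirst : PySem.Dict Char (List String) :=
  ecoListB.foldl (fun d p =>
    if 4 ≤ PySem.Str.len p then
      match p.toList.head? with
      | some c => d.insert c (d.getD c [] ++ [p])
      | none => d
    else d) PySem.Dict.empty

-- the sweep: for i, ch in enumerate(lower): any(lower.startswith(p, i) for p in _BY_FIRST.get(ch, ()))
def scanLong : List Char → Bool
  | [] => false
  | c :: rest =>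
      (longByFirst.getD c []).any (fun p => PySem.Chars.startswith (c :: rest) p.toList)
      || scanLong rest

def is_ecosystem_term_py_alt (term : String) : Bool :=
  let lower := PySem.Str.lower term
  if PySem.Set.contains shortProducts lower then true
  else scanLong lower.toList

-- ===== PRECONDITION & SPEC =====
def Spec_is_ecosystem_term_py (term : String) (out : Bool) : Prop := out = is_ecosystem_term_py_alt term
instance (term : String) (out : Bool) : Decidable (Spec_is_ecosystem_term_py term out) := by unfold Spec_is_ecosystem_term_py; infer_instance

-- ===== CLAIM (what is proved, stated in full; the proofs are below) =====
def Claim_equal_is_ecosystem_term_py : Prop := ∀ (term : String), Dom_is_ecosystem_term_py term → Spec_is_ecosystem_term_py term (is_ecosystem_term_py term)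

-- ===== LEMMAS AND PROOFS =====

-- split₀.go consumes a whitespace-free word by pushing it onto cur
theorem go_word (w : List Char) (hw : ∀ c ∈ w, PySem.Chars.isspace c = false)
    (s cur : List Char) (acc : List (List Char)) :
    PySem.Chars.split₀.go (w ++ s) cur acc = PySem.Chars.split₀.go s (w.reverse ++ cur) acc := by
  induction w generalizing cur with
  | nil => simp
  | cons c w ih =>
    have hc := hw c (by simp)
    simp only [List.cons_append, PySem.Chars.split₀.go, hc, Bool.false_eq_true, if_false]
    rw [ih (fun c hc => hw c (by simp [hc]))]
    simp

-- split₀.go on nonempty whitespace-free words joined by single spaces returns the words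
theorem go_inter (words : List (List Char))
    (h : ∀ w ∈ words, w ≠ [] ∧ ∀ c ∈ w, PySem.Chars.isspace c = false)
    (acc : List (List Char)) :
    PySem.Chars.split₀.go (List.intercalate [' '] words) [] acc = acc.reverse ++ words := by
  induction words generalizing acc with
  | nil => simp [PySem.Chars.split₀.go, List.intercalate]
  | cons w ws ih =>
    obtain ⟨hw1, hw2⟩ := h w (by simp)
    cases ws with
    | nil =>
      have : List.intercalate [' '] [w] = w ++ ([] : List Char) := by simp [List.intercalate]
      rw [this, go_word w hw2]
      simp [PySem.Chars.split₀.go, hw1]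
    | cons w' ws' =>
      have hint : List.intercalate [' '] (w :: w' :: ws') = w ++ ' ' :: List.intercalate [' '] (w' :: ws') := by
        simp [List.intercalate, List.intersperse]
      rw [hint, go_word w hw2]
      have hsp : PySem.Chars.isspace ' ' = true := by decide
      simp only [PySem.Chars.split₀.go, hsp, if_true]
      rw [if_neg (by simp [hw1])]
      rw [ih (fun x hx => h x (by simp [hx]))]
      simp

-- s.split() of nonempty space-free words joined by single spaces is the word list
theorem split₀_words (s : String) (ws : List String)
    (hb : s.toList = List.intercalate [' '] (ws.map String.toList))
    (hok : (ws.map String.toList).all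
      (fun w => !w.isEmpty && w.all (fun c => !PySem.Chars.isspace c)) = true) :
    PySem.Str.split₀ s = ws := by
  have hok' : ∀ w ∈ ws.map String.toList, w ≠ [] ∧ ∀ c ∈ w, PySem.Chars.isspace c = false := by
    simp only [List.all_eq_true, Bool.and_eq_true, Bool.not_eq_eq_eq_not, Bool.not_true,
      List.isEmpty_eq_false_iff] at hok
    intro w hw
    obtain ⟨h1, h2⟩ := hok w hw
    exact ⟨h1, by simpa [List.all_eq_true] using h2⟩
  unfold PySem.Str.split₀ PySem.Chars.split₀
  rw [hb, go_inter _ hok']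
  simp [Function.comp_def, String.ofList_toList]

set_option maxRecDepth 8000 in
theorem hline1 : PySem.Str.split₀ "marketo mkto pardot eloqua hubspot mailchimp exacttarget salesforcemktg demandbase 6sense" = ["marketo","mkto","pardot","eloqua","hubspot","mailchimp","exacttarget","salesforcemktg","demandbase","6sense"] :=
  split₀_words _ _ (by rfl) (by rfl)

set_option maxRecDepth 8000 in
theorem hline2 : PySem.Str.split₀ "bombora terminus rollworks triblio zoominfo clearbit dun dnb hoovers leadiq" = ["bombora","terminus","rollworks","triblio","zoominfo","clearbit","dun","dnb","hoovers","leadiq"] :=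
  split₀_words _ _ (by rfl) (by rfl)

set_option maxRecDepth 8000 in
theorem hline3 : PySem.Str.split₀ "lusha apollo cognism seamless slintel outreach salesloft gong chorus clari" = ["lusha","apollo","cognism","seamless","slintel","outreach","salesloft","gong","chorus","clari"] :=
  split₀_words _ _ (by rfl) (by rfl)

set_option maxRecDepth 8000 in
theorem hline4 : PySem.Str.split₀ "groove xactly velocify ringdna orum conga apttus docusign pandadoc zuora" = ["groove","xactly","velocify","ringdna","orum","conga","apttus","docusign","pandadoc","zuora"] :=
  split₀_words _ _ (by rfl) (by rfl)

set_option maxRecDepth 8000 in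
theorem hline5 : PySem.Str.split₀ "chargebee recurly avalara mulesoft jitterbit informatica talend workato tray celigo" = ["chargebee","recurly","avalara","mulesoft","jitterbit","informatica","talend","workato","tray","celigo"] :=
  split₀_words _ _ (by rfl) (by rfl)

set_option maxRecDepth 8000 in
theorem hline6 : PySem.Str.split₀ "boomi snaplogic linkedin slack twilio sendgrid ringcentral vonage bandwidth plivo" = ["boomi","snaplogic","linkedin","slack","twilio","sendgrid","ringcentral","vonage","bandwidth","plivo"] :=
  split₀_words _ _ (by rfl) (by rfl)

set_option maxRecDepth 8000 in
theorem hline7 : PySem.Str.split₀ "talkdesk zendesk freshdesk intercom drift qualified livechat chatbot ada tableau" = ["talkdesk","zendesk","freshdesk","intercom","drift","qualified","livechat","chatbot","ada","tableau"] :=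
  split₀_words _ _ (by rfl) (by rfl)

set_option maxRecDepth 8000 in
theorem hline8 : PySem.Str.split₀ "domo looker powerbi qlik sisense jira asana monday smartsheet wrike" = ["domo","looker","powerbi","qlik","sisense","jira","asana","monday","smartsheet","wrike"] :=
  split₀_words _ _ (by rfl) (by rfl)

set_option maxRecDepth 8000 in
theorem hline9 : PySem.Str.split₀ "basecamp confluence notion netsuite quickbooks xero sage intacct workday coupa" = ["basecamp","confluence","notion","netsuite","quickbooks","xero","sage","intacct","workday","coupa"] :=
  split₀_words _ _ (by rfl) (by rfl)

set_option maxRecDepth 8000 in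
theorem hline10 : PySem.Str.split₀ "ariba certify expensify ringlead cloudingo cloudinga usergem clay datagrail validity" = ["ariba","certify","expensify","ringlead","cloudingo","cloudinga","usergem","clay","datagrail","validity"] :=
  split₀_words _ _ (by rfl) (by rfl)

set_option maxRecDepth 8000 in
theorem hline11 : PySem.Str.split₀ "people dupe showpad highspot seismic calendly chili formstack netdocuments adobe" = ["people","dupe","showpad","highspot","seismic","calendly","chili","formstack","netdocuments","adobe"] :=
  split₀_words _ _ (by rfl) (by rfl)

set_option maxRecDepth 8000 in
theorem hline12 : PySem.Str.split₀ "echosign hellosign npsp npe hed sfims dlrs bizible bizible2 bizibleid" = ["echosign","hellosign","npsp","npe","hed","sfims","dlrs","bizible","bizible2","bizibleid"] :=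
  split₀_words _ _ (by rfl) (by rfl)

set_option maxRecDepth 8000 in
theorem hline13 : PySem.Str.split₀ "mkto_si mkto71 x6sense lsf sked cventsfdc rh2 lnt dozisf zvc" = ["mkto_si","mkto71","x6sense","lsf","sked","cventsfdc","rh2","lnt","dozisf","zvc"] :=
  split₀_words _ _ (by rfl) (by rfl)

-- splitting B's blob lines yields exactly A's product list
theorem ecoListB_eq : ecoListB = ecoProducts := by
  unfold ecoListB ecoLines
  simp only [List.flatMap_cons, List.flatMap_nil, hline1, hline2, hline3, hline4, hline5,
    hline6, hline7, hline8, hline9, hline10, hline11, hline12, hline13]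
  rfl

-- invariant of the grouping fold: each bucket is the starting dict's bucket followed by
-- the long products of the processed list whose first character is the key
theorem bucket_inv (l : List String) (d : PySem.Dict Char (List String)) (c : Char) :
    (l.foldl (fun d p =>
      if 4 ≤ PySem.Str.len p then
        match p.toList.head? with
        | some c' => d.insert c' (d.getD c' [] ++ [p])
        | none => d
      else d) d).getD c []
    = d.getD c [] ++ l.filter (fun p => decide (4 ≤ PySem.Str.len p) && (p.toList.head? == some c)) := by
  induction l generalizing d with
  | nil => simp
  | cons p l ih =>
    simp only [List.foldl_cons, List.filter_cons]
    by_cases hlen : 4 ≤ PySem.Str.len p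
    · cases hh : p.toList.head? with
      | none =>
        exfalso
        rw [PySem.Str.len_eq] at hlen
        rw [List.head?_eq_none_iff] at hh
        rw [hh] at hlen
        simp at hlen
      | some c' =>
        simp only [if_pos hlen]
        rw [ih]
        have hdl : decide (4 ≤ PySem.Str.len p) = true := decide_eq_true hlen
        by_cases hc : c = c'
        · subst hc
          rw [PySem.Dict.getD_insert_self, hdl]
          simp
        · rw [PySem.Dict.getD_insert_of_ne _ _ _ hc]
          have hbeq : ((some c' : Option Char) == some c) = false := by
            simpa using fun h => hc h.symm
          rw [hbeq, Bool.and_false]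
          simp
    · have hdl : decide (4 ≤ PySem.Str.len p) = false := decide_eq_false hlen
      simp only [if_neg hlen]
      rw [ih]
      have hcond : (decide (4 ≤ PySem.Str.len p) && (p.toList.head? == some c)) = false := by
        rw [hdl, Bool.false_and]
      rw [hcond]
      simp

theorem mem_bucket_iff (c : Char) (p : String) :
    p ∈ longByFirst.getD c [] ↔
      p ∈ ecoProducts ∧ 4 ≤ PySem.Str.len p ∧ p.toList.head? = some c := by
  unfold longByFirst
  rw [ecoListB_eq, bucket_inv, PySem.Dict.getD_empty]
  simp [List.mem_filter]

-- the bucket test at a position equals the full long-product test at that position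
theorem bucket_any_eq (c : Char) (rest : List Char) :
    ((longByFirst.getD c []).any (fun p => PySem.Chars.startswith (c :: rest) p.toList))
      = (ecoProducts.any fun p =>
          decide (4 ≤ PySem.Str.len p) && PySem.Chars.startswith (c :: rest) p.toList) := by
  rw [Bool.eq_iff_iff]
  simp only [List.any_eq_true, Bool.and_eq_true, decide_eq_true_eq]
  constructor
  · rintro ⟨p, hp, hsw⟩
    obtain ⟨h1, h2, _⟩ := (mem_bucket_iff c p).mp hp
    exact ⟨p, h1, h2, hsw⟩
  · rintro ⟨p, hp, hlen, hsw⟩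
    refine ⟨p, ?_, hsw⟩
    have hpre := (PySem.Chars.startswith_iff _ _).mp hsw
    have hhead : p.toList.head? = some c := by
      obtain ⟨t, ht⟩ := hpre
      cases hl : p.toList with
      | nil => rw [PySem.Str.len_eq, hl] at hlen; simp at hlen
      | cons a tl => rw [hl] at ht; cases ht; simp
    exact (mem_bucket_iff c p).mpr ⟨hp, hlen, hhead⟩

-- the sweep finds exactly the long products occurring as a substring
theorem scanLong_iff (cs : List Char) :
    scanLong cs = true ↔
      ∃ p ∈ ecoProducts, 4 ≤ PySem.Str.len p ∧ ∃ j, p.toList <+: cs.drop j := by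
  induction cs with
  | nil =>
    simp only [scanLong]
    constructor
    · intro h; cases h
    · rintro ⟨p, _, hlen, j, hpre⟩
      simp only [List.drop_nil] at hpre
      rw [PySem.Str.len_eq, List.prefix_nil.mp hpre] at hlen
      simp at hlen
  | cons c rest ih =>
    simp only [scanLong, Bool.or_eq_true, bucket_any_eq, ih]
    simp only [List.any_eq_true, Bool.and_eq_true, decide_eq_true_eq,
      PySem.Chars.startswith_iff]
    constructor
    · rintro (⟨p, hp, hlen, hsw⟩ | ⟨p, hp, hlen, j, hpre⟩)
      · exact ⟨p, hp, hlen, 0, by simpa using hsw⟩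
      · exact ⟨p, hp, hlen, j + 1, by simpa using hpre⟩
    · rintro ⟨p, hp, hlen, j, hpre⟩
      cases j with
      | zero => exact Or.inl ⟨p, hp, hlen, by simpa using hpre⟩
      | succ j => exact Or.inr ⟨p, hp, hlen, j, by simpa using hpre⟩

theorem str_isIn_iff_drop (sub s : String) :
    PySem.Str.isIn sub s = true ↔ ∃ j, sub.toList <+: List.drop j s.toList := by
  rw [PySem.Str.isIn_eq, ← PySem.Chars.exists_prefix_drop_iff_isIn]

theorem ports_eq (term : String) : is_ecosystem_term_py term = is_ecosystem_term_py_alt term := by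
  unfold is_ecosystem_term_py is_ecosystem_term_py_alt
  set lower := PySem.Str.lower term
  rw [Bool.eq_iff_iff]
  simp only [Bool.if_true_left, Bool.or_eq_true, PySem.Set.contains_iff, List.any_eq_true,
    Bool.and_eq_true, decide_eq_true_eq, scanLong_iff, shortProducts, ecoListB_eq,
    PySem.Set.mem_ofList, List.mem_filter, str_isIn_iff_drop]
  constructor
  · rintro (hmem | ⟨p, hp, hlen, j, hpre⟩)
    · by_cases hlen : 4 ≤ PySem.Str.len lower
      · exact Or.inr ⟨lower, hmem, hlen, 0, by simp⟩
      · exact Or.inl ⟨hmem, not_le.mp hlen⟩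
    · exact Or.inr ⟨p, hp, hlen, j, hpre⟩
  · rintro (⟨hmem, _⟩ | ⟨p, hp, hlen, j, hpre⟩)
    · exact Or.inl hmem
    · exact Or.inr ⟨p, hp, hlen, j, hpre⟩

-- ===== VERDICT (by name: the statement is the Claim_ definition above) =====
theorem is_ecosystem_term_py_spec : Claim_equal_is_ecosystem_term_py := by
  intro term _
  exact ports_eq term
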